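-- pv_equiv track=rewrite | github.com/Shuja-Mahmood/JPEG-Compression | math_functions.py | entropy_decoding
-- ===== SOURCE A (Python) =====
-- def entropy_decoding(array, n = 8):
--     """converts a 1D 'entropy' encoded array to n x n matrix"""
--
--     count = 0
--     # 2D array container
--     matrix = [[0 for i in range(n)] for i in range(n)]
--
--     for i in range(n):
--         # Iterate through upper left triangle (including centeral diagonal)
--         for j in range(i+1):
--             # Each nth diagonal contains n+1 elements
--             if j == 0:
--                 # Initialize indexes
--                 x = i
--                 y = 0
--             if i % 2 == 0:
--                 # Moving up the diagonal
--                 matrix[x][y] = array[count]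
--             else:
--                 # Moving down the diagonal
--                 matrix[y][x] = array[count]
--             # Move to next element
--             x -= 1
--             y += 1
--             count += 1
--     for i in range(n - 1, 0, -1):
--         # Iterate lower triangle (excluding central diagonal)
--         for j in range(i):
--             # Each nth diagonal contains n elements
--             if j == 0:
--                 # Initialize indexes
--                 x = n - i
--                 y = n - 1
--             if i % 2 == 0:
--                 # Move up the diagonal
--                 matrix[x][y] = array[count]
--             else:
--                 # Move down th diagonal
--                 matrix[y][x] = array[count]
--             # Move to next element
--             x += 1
--             y -= 1
--             count += 1
--     return matrix
-- ===== SOURCE B (Python) =====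
-- def entropy_decoding(array, n = 8):
--     """converts a 1D 'entropy' encoded array to n x n matrix"""
--     matrix = [[0] * n for _ in range(n)]
--     count = 0
--     # one pass over anti-diagonals s = r + c; even s is walked bottom-to-top, odd s top-to-bottom
--     for s in range(2 * n - 1):
--         lo = max(0, s - n + 1)
--         hi = min(s, n - 1)
--         rows = range(hi, lo - 1, -1) if s % 2 == 0 else range(lo, hi + 1)
--         for r in rows:
--             matrix[r][s - r] = array[count]
--             count += 1
--     return matrix
-- ===== Notes on version B (the rewrite author's own statement) =====
-- stated objective: simpler
-- what changed: Replaces A's two triangle loops with hand-stepped x/y pointers and per-step j==0 re-initialisation by a single pass over anti-diagonals s = r+c, computing each diagonal's clamped row range directly and reversing it for even s.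
import Mathlib
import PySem

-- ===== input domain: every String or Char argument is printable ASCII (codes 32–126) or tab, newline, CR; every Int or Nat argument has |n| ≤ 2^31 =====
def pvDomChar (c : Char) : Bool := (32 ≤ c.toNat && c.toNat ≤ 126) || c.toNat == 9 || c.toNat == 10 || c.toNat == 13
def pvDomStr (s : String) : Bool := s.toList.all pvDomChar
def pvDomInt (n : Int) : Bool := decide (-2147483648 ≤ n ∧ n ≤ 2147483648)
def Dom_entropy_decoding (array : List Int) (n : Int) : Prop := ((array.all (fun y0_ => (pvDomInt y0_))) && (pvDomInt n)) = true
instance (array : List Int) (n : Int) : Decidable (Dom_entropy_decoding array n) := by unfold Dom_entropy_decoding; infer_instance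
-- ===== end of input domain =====

-- B replaces A's two triangle loops with hand-stepped x/y pointers by a single clamped
-- pass over anti-diagonals s = r + c (objective: simpler); return values proved equal on Pre_.

-- ===== PORT A =====
-- state: (matrix, x, y, count); array[count] is pyGetD (IndexError excluded by Pre_)
def bodyA1 (array : List Int) (i : Int)
    (st : List (List Int) × Int × Int × Int) (j : Int) : List (List Int) × Int × Int × Int :=
  let x := if j = 0 then i else st.2.1
  let y := if j = 0 then (0 : Int) else st.2.2.1
  let c := st.2.2.2
  let m := if PySem.Int.mod i 2 = 0 then
      PySem.List.pySetD st.1 x (PySem.List.pySetD (PySem.List.pyGetD st.1 x []) y (PySem.List.pyGetD array c 0))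
    else
      PySem.List.pySetD st.1 y (PySem.List.pySetD (PySem.List.pyGetD st.1 y []) x (PySem.List.pyGetD array c 0))
  (m, x - 1, y + 1, c + 1)

def bodyA2 (array : List Int) (n i : Int)
    (st : List (List Int) × Int × Int × Int) (j : Int) : List (List Int) × Int × Int × Int :=
  let x := if j = 0 then n - i else st.2.1
  let y := if j = 0 then n - 1 else st.2.2.1
  let c := st.2.2.2
  let m := if PySem.Int.mod i 2 = 0 then
      PySem.List.pySetD st.1 x (PySem.List.pySetD (PySem.List.pyGetD st.1 x []) y (PySem.List.pyGetD array c 0))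
    else
      PySem.List.pySetD st.1 y (PySem.List.pySetD (PySem.List.pyGetD st.1 y []) x (PySem.List.pyGetD array c 0))
  (m, x + 1, y - 1, c + 1)

def entropy_decoding (array : List Int) (n : Int) : List (List Int) :=
  let matrix : List (List Int) :=
    (PySem.List.pyRange 0 n 1).map (fun _ => (PySem.List.pyRange 0 n 1).map (fun _ => (0 : Int)))
  let st1 := (PySem.List.pyRange 0 n 1).foldl
    (fun st i => (PySem.List.pyRange 0 (i + 1) 1).foldl (bodyA1 array i) st)
    (matrix, 0, 0, 0)
  let st2 := (PySem.List.pyRange (n - 1) 0 (-1)).foldl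
    (fun st i => (PySem.List.pyRange 0 i 1).foldl (bodyA2 array n i) st) st1
  st2.1

-- ===== PORT B =====
-- state: (matrix, count)
def bodyB (array : List Int) (s : Int)
    (st : List (List Int) × Int) (r : Int) : List (List Int) × Int :=
  (PySem.List.pySetD st.1 r (PySem.List.pySetD (PySem.List.pyGetD st.1 r []) (s - r) (PySem.List.pyGetD array st.2 0)),
   st.2 + 1)

def entropy_decoding_alt (array : List Int) (n : Int) : List (List Int) :=
  let matrix : List (List Int) :=
    (PySem.List.pyRange 0 n 1).map (fun _ => List.replicate n.toNat (0 : Int))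
  let st := (PySem.List.pyRange 0 (2 * n - 1) 1).foldl
    (fun st s =>
      let lo := max 0 (s - n + 1)
      let hi := min s (n - 1)
      let rows := if PySem.Int.mod s 2 = 0 then PySem.List.pyRange hi (lo - 1) (-1)
                  else PySem.List.pyRange lo (hi + 1) 1
      rows.foldl (bodyB array s) st)
    (matrix, 0)
  st.1

-- ===== PRECONDITION & SPEC =====
-- Pre_ excludes exactly the inputs where Python A raises IndexError: n ≥ 1 with fewer than n*n array elements (B raises there too).
def Pre_entropy_decoding (array : List Int) (n : Int) : Prop := n ≤ 0 ∨ n * n ≤ (array.length : Int)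
instance (array : List Int) (n : Int) : Decidable (Pre_entropy_decoding array n) := by unfold Pre_entropy_decoding; infer_instance
def pvWitness_entropy_decoding : List Int × Int := ([1, 2, 3, 4], 2)

def Spec_entropy_decoding (array : List Int) (n : Int) (out : List (List Int)) : Prop := out = entropy_decoding_alt array n
instance (array : List Int) (n : Int) (out : List (List Int)) : Decidable (Spec_entropy_decoding array n out) := by unfold Spec_entropy_decoding; infer_instance

-- ===== CLAIM (what is proved, stated in full; the proofs are below) =====
def Claim_equal_entropy_decoding : Prop := ∀ (array : List Int) (n : Int), Dom_entropy_decoding array n → Pre_entropy_decoding array n → Spec_entropy_decoding array n (entropy_decoding array n)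

-- ===== LEMMAS AND PROOFS =====

-- write matrix[r][c] = v
def setCell (m : List (List Int)) (r c v : Int) : List (List Int) :=
  PySem.List.pySetD m r (PySem.List.pySetD (PySem.List.pyGetD m r []) c v)

-- assign array[count], array[count+1], … to the listed cells in order
def fillCells (array : List Int) (st : List (List Int) × Int) (cells : List (Int × Int)) :
    List (List Int) × Int :=
  cells.foldl (fun st rc => (setCell st.1 rc.1 rc.2 (PySem.List.pyGetD array st.2 0), st.2 + 1)) st

-- cells of an upper diagonal walked from (x,y) stepping x-1,y+1 (swapped when i is odd)
def cellsSeg (i x y : Int) (len : Nat) : List (Int × Int) :=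
  (List.range len).map (fun (t : Nat) => if PySem.Int.mod i 2 = 0 then (x - (t : Int), y + (t : Int)) else (y + (t : Int), x - (t : Int)))

-- cells of a lower diagonal walked from (x,y) stepping x+1,y-1 (swapped when i is odd)
def cellsSeg2 (i x y : Int) (len : Nat) : List (Int × Int) :=
  (List.range len).map (fun (t : Nat) => if PySem.Int.mod i 2 = 0 then (x + (t : Int), y - (t : Int)) else (y - (t : Int), x + (t : Int)))

def upperCells (k : Nat) : List (Int × Int) :=
  (List.range k).flatMap (fun (i : Nat) => cellsSeg ↑i ↑i 0 (i + 1))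

def lowerCells (n : Int) (k : Nat) : List (Int × Int) :=
  ((List.range k).map (fun t => k - t)).flatMap (fun (i : Nat) => cellsSeg2 ↑i (n - ↑i) (n - 1) i)

def cellsB (n s : Int) : List (Int × Int) :=
  (if PySem.Int.mod s 2 = 0 then PySem.List.pyRange (min s (n - 1)) (max 0 (s - n + 1) - 1) (-1)
   else PySem.List.pyRange (max 0 (s - n + 1)) (min s (n - 1) + 1) 1).map (fun r => (r, s - r))

theorem fillCells_cons (array : List Int) (st : List (List Int) × Int) (rc : Int × Int)
    (cs : List (Int × Int)) :
    fillCells array st (rc :: cs)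
      = fillCells array (setCell st.1 rc.1 rc.2 (PySem.List.pyGetD array st.2 0), st.2 + 1) cs := rfl

theorem fillCells_append (array : List Int) (st : List (List Int) × Int)
    (cs ds : List (Int × Int)) :
    fillCells array st (cs ++ ds) = fillCells array (fillCells array st cs) ds := by
  simp [fillCells, List.foldl_append]

theorem fillCells_snd (array : List Int) (st : List (List Int) × Int) (cs : List (Int × Int)) :
    (fillCells array st cs).2 = st.2 + cs.length := by
  induction cs generalizing st with
  | nil => simp [fillCells]
  | cons c cs ih => rw [fillCells_cons, ih]; simp; omega

theorem cellsSeg_succ (i x y : Int) (len : Nat) :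
    cellsSeg i x y (len + 1)
      = (if PySem.Int.mod i 2 = 0 then (x, y) else (y, x)) :: cellsSeg i (x - 1) (y + 1) len := by
  simp only [cellsSeg, List.range_succ_eq_map, List.map_cons, List.map_map]
  refine congrArg₂ List.cons ?_ ?_
  · split_ifs <;> simp
  · apply List.map_congr_left; intro t _
    simp only [Function.comp]
    split_ifs <;> simp only [Prod.mk.injEq] <;> constructor <;> push_cast <;> ring

theorem cellsSeg2_succ (i x y : Int) (len : Nat) :
    cellsSeg2 i x y (len + 1)
      = (if PySem.Int.mod i 2 = 0 then (x, y) else (y, x)) :: cellsSeg2 i (x + 1) (y - 1) len := by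
  simp only [cellsSeg2, List.range_succ_eq_map, List.map_cons, List.map_map]
  refine congrArg₂ List.cons ?_ ?_
  · split_ifs <;> simp
  · apply List.map_congr_left; intro t _
    simp only [Function.comp]
    split_ifs <;> simp only [Prod.mk.injEq] <;> constructor <;> push_cast <;> ring

-- A's inner loop after the j = 0 step is a pure pointer walk over cellsSeg
theorem foldA1_tail (array : List Int) (i : Int) (js : List Int) (hjs : ∀ j ∈ js, j ≠ 0)
    (m : List (List Int)) (x y c : Int) :
    js.foldl (bodyA1 array i) (m, x, y, c)
      = ((fillCells array (m, c) (cellsSeg i x y js.length)).1,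
         x - js.length, y + js.length, c + js.length) := by
  induction js generalizing m x y c with
  | nil => simp [cellsSeg, fillCells]
  | cons j js ih =>
    have hj : ¬ j = 0 := hjs j (by simp)
    rw [List.foldl_cons, List.length_cons, cellsSeg_succ, fillCells_cons]
    by_cases hpar : PySem.Int.mod i 2 = 0
    · simp only [bodyA1, hj, if_pos hpar, ite_false]
      rw [ih (fun j hj => hjs j (by simp [hj]))]
      simp only [setCell, Prod.mk.injEq]
      exact ⟨trivial, by push_cast; ring, by push_cast; ring, by push_cast; ring⟩
    · simp only [bodyA1, hj, hpar, ite_false]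
      rw [ih (fun j hj => hjs j (by simp [hj]))]
      simp only [setCell, Prod.mk.injEq]
      exact ⟨trivial, by push_cast; ring, by push_cast; ring, by push_cast; ring⟩

theorem foldA2_tail (array : List Int) (n i : Int) (js : List Int) (hjs : ∀ j ∈ js, j ≠ 0)
    (m : List (List Int)) (x y c : Int) :
    js.foldl (bodyA2 array n i) (m, x, y, c)
      = ((fillCells array (m, c) (cellsSeg2 i x y js.length)).1,
         x + js.length, y - js.length, c + js.length) := by
  induction js generalizing m x y c with
  | nil => simp [cellsSeg2, fillCells]
  | cons j js ih =>
    have hj : ¬ j = 0 := hjs j (by simp)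
    rw [List.foldl_cons, List.length_cons, cellsSeg2_succ, fillCells_cons]
    by_cases hpar : PySem.Int.mod i 2 = 0
    · simp only [bodyA2, hj, if_pos hpar, ite_false]
      rw [ih (fun j hj => hjs j (by simp [hj]))]
      simp only [setCell, Prod.mk.injEq]
      exact ⟨trivial, by push_cast; ring, by push_cast; ring, by push_cast; ring⟩
    · simp only [bodyA2, hj, hpar, ite_false]
      rw [ih (fun j hj => hjs j (by simp [hj]))]
      simp only [setCell, Prod.mk.injEq]
      exact ⟨trivial, by push_cast; ring, by push_cast; ring, by push_cast; ring⟩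

-- one full upper diagonal i (0 ≤ i)
theorem innerA1_eq (array : List Int) (i : Int) (hi : 0 ≤ i) (m : List (List Int)) (x y c : Int) :
    (PySem.List.pyRange 0 (i + 1) 1).foldl (bodyA1 array i) (m, x, y, c)
      = ((fillCells array (m, c) (cellsSeg i i 0 (i.toNat + 1))).1, -1, i + 1, c + (i + 1)) := by
  rw [PySem.List.pyRange_one_cons (by omega), List.foldl_cons]
  have h0 : bodyA1 array i (m, x, y, c) 0
      = (setCell m (if PySem.Int.mod i 2 = 0 then i else 0) (if PySem.Int.mod i 2 = 0 then 0 else i)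
          (PySem.List.pyGetD array c 0), i - 1, 0 + 1, c + 1) := by
    by_cases hpar : PySem.Int.mod i 2 = 0 <;> simp only [bodyA1, setCell, hpar] <;> norm_num
  rw [h0, foldA1_tail array i _ (fun j hj => by
        have := (PySem.List.mem_pyRange_one).1 hj; omega)]
  rw [PySem.List.length_pyRange_one]
  rw [cellsSeg_succ, fillCells_cons]
  have hlen : ((i + 1 - 1).toNat : Int) = i := by omega
  have hlen2 : (i + 1 - 1).toNat = i.toNat := by omega
  simp only [Prod.mk.injEq]
  refine ⟨?_, by omega, by omega, by omega⟩
  by_cases hpar : PySem.Int.mod i 2 = 0 <;> simp only [hpar, setCell] <;> norm_num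

-- one full lower diagonal i (1 ≤ i)
theorem innerA2_eq (array : List Int) (n i : Int) (hi : 1 ≤ i) (m : List (List Int)) (x y c : Int) :
    (PySem.List.pyRange 0 i 1).foldl (bodyA2 array n i) (m, x, y, c)
      = ((fillCells array (m, c) (cellsSeg2 i (n - i) (n - 1) i.toNat)).1, n, n - 1 - i, c + i) := by
  rw [PySem.List.pyRange_one_cons (by omega), List.foldl_cons]
  have h0 : bodyA2 array n i (m, x, y, c) 0
      = (setCell m (if PySem.Int.mod i 2 = 0 then n - i else n - 1)
          (if PySem.Int.mod i 2 = 0 then n - 1 else n - i)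
          (PySem.List.pyGetD array c 0), n - i + 1, n - 1 - 1, c + 1) := by
    by_cases hpar : PySem.Int.mod i 2 = 0 <;> simp only [bodyA2, setCell, hpar] <;> norm_num
  rw [h0, foldA2_tail array n i _ (fun j hj => by
        have := (PySem.List.mem_pyRange_one).1 hj; omega)]
  rw [PySem.List.length_pyRange_one]
  have hlen2 : (i - 1).toNat + 1 = i.toNat := by omega
  rw [← hlen2, cellsSeg2_succ, fillCells_cons]
  have hc : ((i - 1).toNat : Int) = i - 1 := by omega
  simp only [Prod.mk.injEq]
  refine ⟨?_, by omega, by omega, by omega⟩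
  by_cases hpar : PySem.Int.mod i 2 = 0 <;> simp only [hpar, setCell] <;> norm_num

theorem cellsSeg_length (i x y : Int) (len : Nat) : (cellsSeg i x y len).length = len := by
  simp [cellsSeg]

theorem cellsSeg2_length (i x y : Int) (len : Nat) : (cellsSeg2 i x y len).length = len := by
  simp [cellsSeg2]

theorem upperCells_succ (k : Nat) :
    upperCells (k + 1) = upperCells k ++ cellsSeg (k : Int) (k : Int) 0 (k + 1) := by
  simp [upperCells, List.range_succ]

theorem lowerCells_succ (n : Int) (k : Nat) :
    lowerCells n (k + 1)
      = cellsSeg2 ((k : Int) + 1) (n - ((k : Int) + 1)) (n - 1) (k + 1) ++ lowerCells n k := by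
  simp only [lowerCells, List.range_succ_eq_map, List.map_cons, List.map_map, List.flatMap_cons]
  have h1 : (k + 1 - 0 : Nat) = k + 1 := by omega
  rw [h1]
  refine congrArg₂ (· ++ ·) (by push_cast; ring_nf) ?_
  refine congrArg List.flatten (congrArg₂ List.map rfl ?_)
  · apply List.map_congr_left; intro t ht
    simp only [Function.comp]
    omega

theorem fillCells_eta (array : List Int) (st : List (List Int) × Int) (cs : List (Int × Int)) :
    fillCells array st cs = ((fillCells array st cs).1, st.2 + (cs.length : Int)) := by
  rw [← fillCells_snd]

-- A's first phase fills the upper diagonals in order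
theorem phase1 (array : List Int) (k : Nat) (m : List (List Int)) (x y c : Int) :
    ∃ x' y', (PySem.List.pyRange 0 (k : Int) 1).foldl
        (fun st i => (PySem.List.pyRange 0 (i + 1) 1).foldl (bodyA1 array i) st) (m, x, y, c)
      = ((fillCells array (m, c) (upperCells k)).1, x', y', c + ((upperCells k).length : Int)) := by
  induction k with
  | zero =>
    refine ⟨x, y, ?_⟩
    rw [PySem.List.pyRange_one_eq_nil (by omega)]
    simp [upperCells, fillCells]
  | succ k ih =>
    have hcast : ((k + 1 : Nat) : Int) = (k : Int) + 1 := by push_cast; ring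
    rw [hcast, PySem.List.pyRange_one_succ_right (by positivity), List.foldl_append]
    obtain ⟨x', y', h⟩ := ih
    rw [h, List.foldl_cons, List.foldl_nil,
        innerA1_eq array (k : Int) (by positivity), upperCells_succ, fillCells_append,
        fillCells_eta array (m, c) (upperCells k)]
    refine ⟨-1, (k : Int) + 1, ?_⟩
    push_cast
    simp only [Prod.mk.injEq, Int.toNat_natCast, List.length_append, cellsSeg_length]
    and_intros <;> first | rfl | trivial | (push_cast; ring)

-- A's second phase fills the lower diagonals in order (i = k, k-1, …, 1)
theorem phase2 (array : List Int) (n : Int) (k : Nat) (m : List (List Int)) (x y c : Int) :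
    ∃ x' y', (PySem.List.pyRange (k : Int) 0 (-1)).foldl
        (fun st i => (PySem.List.pyRange 0 i 1).foldl (bodyA2 array n i) st) (m, x, y, c)
      = ((fillCells array (m, c) (lowerCells n k)).1, x', y', c + ((lowerCells n k).length : Int)) := by
  induction k generalizing m x y c with
  | zero =>
    refine ⟨x, y, ?_⟩
    rw [PySem.List.pyRange_neg_one_eq_nil (by omega)]
    simp [lowerCells, fillCells]
  | succ k ih =>
    have hcast : ((k + 1 : Nat) : Int) = (k : Int) + 1 := by push_cast; ring
    rw [hcast, PySem.List.pyRange_neg_one_cons (by positivity), List.foldl_cons,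
        innerA2_eq array n ((k : Int) + 1) (by omega)]
    have hta : ((k : Int) + 1 - 1) = (k : Int) := by ring
    rw [hta]
    have htn : ((k : Int) + 1).toNat = k + 1 := by omega
    rw [htn]
    obtain ⟨x', y', h⟩ := ih (fillCells array (m, c) (cellsSeg2 ((k:Int)+1) (n - ((k:Int)+1)) (n - 1) (k + 1))).1 n (n - 1 - ((k:Int)+1)) (c + ((k:Int)+1))
    rw [h, lowerCells_succ, fillCells_append,
        fillCells_eta array (m, c) (cellsSeg2 ((k:Int)+1) (n - ((k:Int)+1)) (n - 1) (k + 1))]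
    refine ⟨x', y', ?_⟩
    push_cast
    simp only [Prod.mk.injEq, cellsSeg2_length, List.length_append]
    and_intros <;> first | rfl | trivial | (push_cast; ring)

-- B's inner loop is exactly the fill of the diagonal's cells
theorem innerB_eq (array : List Int) (s : Int) (rows : List Int) (m : List (List Int)) (c : Int) :
    rows.foldl (bodyB array s) (m, c)
      = fillCells array (m, c) (rows.map (fun r => (r, s - r))) := by
  rw [fillCells, List.foldl_map]
  rfl

-- B's outer loop over any diagonal list
theorem outerB (array : List Int) (n : Int) (ss : List Int) (m : List (List Int)) (c : Int) :
    ss.foldl (fun st s =>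
        (if PySem.Int.mod s 2 = 0 then PySem.List.pyRange (min s (n - 1)) (max 0 (s - n + 1) - 1) (-1)
         else PySem.List.pyRange (max 0 (s - n + 1)) (min s (n - 1) + 1) 1).foldl (bodyB array s) st)
      (m, c)
      = fillCells array (m, c) (ss.flatMap (cellsB n)) := by
  induction ss generalizing m c with
  | nil => simp [fillCells]
  | cons s ss ih =>
    rw [List.foldl_cons, innerB_eq, List.flatMap_cons, fillCells_append]
    have hcb : (if PySem.Int.mod s 2 = 0 then PySem.List.pyRange (min s (n - 1)) (max 0 (s - n + 1) - 1) (-1)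
         else PySem.List.pyRange (max 0 (s - n + 1)) (min s (n - 1) + 1) 1).map (fun r => (r, s - r)) = cellsB n s := by
      rw [cellsB]
    rw [hcb]
    rw [fillCells_eta array (m, c) (cellsB n s)] at *
    exact ih _ _

-- upper diagonals coincide: for 0 ≤ s < n, cellsB n s = cellsSeg s s 0 (s+1)
theorem cellsB_upper (n : Int) (i : Nat) (h : (i : Int) < n) :
    cellsB n (i : Int) = cellsSeg (i : Int) (i : Int) 0 (i + 1) := by
  have hmin : min (i : Int) (n - 1) = (i : Int) := by omega
  have hmax : max 0 ((i : Int) - n + 1) = 0 := by omega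
  by_cases hpar : PySem.Int.mod (i : Int) 2 = 0
  · rw [cellsB, if_pos hpar, hmin, hmax, PySem.List.pyRange_neg_one]
    have hlen : ((i : Int) - (0 - 1)).toNat = i + 1 := by omega
    rw [hlen, cellsSeg, List.map_map]
    apply List.map_congr_left; intro t ht
    have htb : t < i + 1 := List.mem_range.1 ht
    simp only [Function.comp, hpar, if_pos]
    refine Prod.ext ?_ ?_ <;> simp
  · rw [cellsB, if_neg hpar, hmin, hmax, PySem.List.pyRange_one]
    have hlen : ((i : Int) + 1 - 0).toNat = i + 1 := by omega
    rw [hlen, cellsSeg, List.map_map]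
    apply List.map_congr_left; intro t ht
    simp only [Function.comp, hpar]
    refine Prod.ext ?_ ?_ <;> simp

-- lower diagonals coincide: s = n + t with i = (n-1) - t
theorem cellsB_lower (n : Int) (t k : Nat) (hk : (k : Int) = n - 1) (ht : t < k) :
    cellsB n (n + (t : Int)) = cellsSeg2 ((k - t : Nat) : Int) (n - ((k - t : Nat) : Int)) (n - 1) (k - t) := by
  have hi : (((k - t : Nat)) : Int) = n - 1 - t := by omega
  have hmin : min (n + (t : Int)) (n - 1) = n - 1 := by omega
  have hmax : max 0 (n + (t : Int) - n + 1) = (t : Int) + 1 := by omega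
  have hparr : PySem.Int.mod (n + (t : Int)) 2 = 0 ↔ ¬ PySem.Int.mod (((k - t : Nat)) : Int) 2 = 0 := by
    simp only [PySem.Int.mod_eq_emod_of_pos (by omega : (0:Int) < 2), hi]
    omega
  by_cases hpar : PySem.Int.mod (n + (t : Int)) 2 = 0
  · have hpar2 : ¬ PySem.Int.mod (((k - t : Nat)) : Int) 2 = 0 := hparr.1 hpar
    rw [cellsB, if_pos hpar, hmin, hmax, PySem.List.pyRange_neg_one]
    have hlen : (n - 1 - ((t : Int) + 1 - 1)).toNat = k - t := by omega
    rw [hlen, cellsSeg2, List.map_map]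
    apply List.map_congr_left; intro u hu
    have hub : u < k - t := List.mem_range.1 hu
    simp only [Function.comp, hpar2]
    refine Prod.ext ?_ ?_ <;> simp
    omega
  · have hpar2 : PySem.Int.mod (((k - t : Nat)) : Int) 2 = 0 := by
      by_contra hcon; exact hpar (hparr.2 hcon)
    rw [cellsB, if_neg hpar, hmin, hmax, PySem.List.pyRange_one]
    have hlen : (n - 1 + 1 - ((t : Int) + 1)).toNat = k - t := by omega
    rw [hlen, cellsSeg2, List.map_map]
    apply List.map_congr_left; intro u hu
    have hub : u < k - t := List.mem_range.1 hu
    simp only [Function.comp, hpar2, if_pos]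
    refine Prod.ext ?_ ?_ <;> simp <;> omega

-- the full diagonal order of B equals A's upper-then-lower order
theorem cells_eq (n : Int) (hn : 1 ≤ n) :
    (PySem.List.pyRange 0 (2 * n - 1) 1).flatMap (cellsB n)
      = upperCells n.toNat ++ lowerCells n (n - 1).toNat := by
  rw [PySem.List.pyRange_one_append 0 n (2 * n - 1) (by omega) (by omega), List.flatMap_append]
  refine congrArg₂ (· ++ ·) ?_ ?_
  · -- upper part
    rw [PySem.List.pyRange_one, upperCells]
    have h0 : (n - 0).toNat = n.toNat := by omega
    rw [h0]
    simp only [List.flatMap, List.map_map]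
    refine congrArg List.flatten ?_
    apply List.map_congr_left; intro i hi
    have hib : i < n.toNat := List.mem_range.1 hi
    simp only [Function.comp, zero_add]
    exact cellsB_upper n i (by omega)
  · -- lower part
    rw [PySem.List.pyRange_one, lowerCells]
    have h0 : (2 * n - 1 - n).toNat = (n - 1).toNat := by omega
    rw [h0]
    simp only [List.flatMap, List.map_map]
    refine congrArg List.flatten ?_
    apply List.map_congr_left; intro t ht
    have htb : t < (n - 1).toNat := List.mem_range.1 ht
    simp only [Function.comp]
    exact cellsB_lower n t (n - 1).toNat (by omega) htb
-- the two ports agree on every input (the precondition is not even needed: where A would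
-- raise IndexError the ports read pyGetD defaults in the same order)
theorem main_eq (array : List Int) (n : Int) :
    entropy_decoding array n = entropy_decoding_alt array n := by
  by_cases hn : n ≤ 0
  · have h1 : PySem.List.pyRange 0 n 1 = [] := PySem.List.pyRange_one_eq_nil (by omega)
    have h2 : PySem.List.pyRange 0 (2 * n - 1) 1 = [] := PySem.List.pyRange_one_eq_nil (by omega)
    have h3 : PySem.List.pyRange (n - 1) 0 (-1) = [] := PySem.List.pyRange_neg_one_eq_nil (by omega)
    simp [entropy_decoding, entropy_decoding_alt, h1, h2, h3]
  · have hn1 : (1 : Int) ≤ n := by omega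
    have hnt : ((n.toNat : Int)) = n := by omega
    have hnt1 : (((n - 1).toNat : Int)) = n - 1 := by omega
    have hmat : (PySem.List.pyRange 0 n 1).map
          (fun _ => (PySem.List.pyRange 0 n 1).map (fun _ => (0 : Int)))
        = (PySem.List.pyRange 0 n 1).map (fun _ => List.replicate n.toNat (0 : Int)) := by
      apply List.map_congr_left; intro a _
      rw [List.map_const', PySem.List.length_pyRange_one]
      norm_num
    simp only [entropy_decoding, entropy_decoding_alt]
    rw [hmat, outerB, cells_eq n hn1]
    obtain ⟨x1, y1, h1⟩ := phase1 array n.toNat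
      ((PySem.List.pyRange 0 n 1).map (fun _ => List.replicate n.toNat (0 : Int))) 0 0 0
    rw [hnt] at h1
    rw [h1]
    obtain ⟨x2, y2, h2⟩ := phase2 array n (n - 1).toNat
      ((fillCells array (((PySem.List.pyRange 0 n 1).map (fun _ => List.replicate n.toNat (0 : Int))), 0)
        (upperCells n.toNat)).1) x1 y1 (0 + ((upperCells n.toNat).length : Int))
    rw [hnt1] at h2
    rw [h2, fillCells_append,
        fillCells_eta array (((PySem.List.pyRange 0 n 1).map (fun _ => List.replicate n.toNat (0 : Int))), 0) (upperCells n.toNat)]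

-- ===== VERDICT (by name: the statement is the Claim_ definition above) =====
theorem entropy_decoding_spec : Claim_equal_entropy_decoding := by
  intro array n _ _
  unfold Spec_entropy_decoding
  exact main_eq array n
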